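-- pv_equiv track=rewrite | github.com/HydrallHarsh/My-DSA-Questions | temp2.py | decrypt_result
-- ===== SOURCE A (Python) =====
-- def char_to_binary(char):
--     if char.isupper():
--         binary = bin(ord(char) - ord('A'))[2:].zfill(8)  # Convert to 8-bit
--         return binary
--     elif char.islower():
--         binary = bin(ord(char) - ord('a'))[2:].zfill(8)  # Convert to 8-bit
--         return binary
--     else:
--         raise ValueError("Invalid character: " + char)
--
-- def binary_to_char(binary):
--     decimal = int(binary, 2) % 26
--     return chr(decimal + ord('A'))
--
-- def decrypt_result(encrypted_result, key, original_xor):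
--     # Repeat the key to match the length of the input string
--     repeated_key = (key * (7 // len(key))) + key[:7 % len(key)]
--
--     binary_encrypted = original_xor
--     binary_key = ''.join(char_to_binary(char) for char in repeated_key)
--
--     decrypted = ''
--     for bit_encrypted, bit_key, bit_original in zip(binary_encrypted, binary_key, original_xor):
--         if bit_original == '1':  # Use the original XOR result
--             decrypted_bit = '1' if bit_encrypted != bit_key else '0'
--         else:
--             decrypted_bit = '1' if bit_encrypted != bit_key else '0'  # Apply modulo 26 for decryption
--         decrypted += decrypted_bit
--
--     # Convert binary result back to characters
--     decrypted_chars = [decrypted[i:i+8] for i in range(0, len(decrypted), 8)]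
--     decrypted_text = ''.join(binary_to_char(char) for char in decrypted_chars)
--     return decrypted_text
-- ===== SOURCE B (Python) =====
-- def decrypt_result(encrypted_result, key, original_xor):
--     # Per-character pass: for each of the 7 key positions take the 8-bit block of
--     # original_xor, fold it against a shifting key-bit register, emit one letter.
--     out = []
--     for j in range(7):
--         block = original_xor[8 * j:8 * j + 8]
--         if not block:
--             break
--         c = key[j % len(key)]
--         if c.isupper():
--             v = ord(c) - ord('A')
--         elif c.islower():
--             v = ord(c) - ord('a')
--         else:
--             raise ValueError("Invalid character: " + c)
--         n = 0
--         w = v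
--         for ch in block:
--             n = 2 * n + (1 if ch != ('1' if w & 128 else '0') else 0)
--             w = (w << 1) & 255
--         out.append(chr(n % 26 + 65))
--     return ''.join(out)
-- ===== Notes on version B (the rewrite author's own statement) =====
-- stated objective: alternative
-- what changed: B replaces A's pipeline (build a 56-bit key string, XOR it bit-by-bit into one big string, re-chunk it into 8-char pieces, re-parse each with int(.,2)) by a single per-key-character pass that slices the 8-char block of original_xor and folds it directly into an integer against a shifting key-bit register, with no intermediate bit-string, chunk list or string re-parsing.
import Mathlib
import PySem

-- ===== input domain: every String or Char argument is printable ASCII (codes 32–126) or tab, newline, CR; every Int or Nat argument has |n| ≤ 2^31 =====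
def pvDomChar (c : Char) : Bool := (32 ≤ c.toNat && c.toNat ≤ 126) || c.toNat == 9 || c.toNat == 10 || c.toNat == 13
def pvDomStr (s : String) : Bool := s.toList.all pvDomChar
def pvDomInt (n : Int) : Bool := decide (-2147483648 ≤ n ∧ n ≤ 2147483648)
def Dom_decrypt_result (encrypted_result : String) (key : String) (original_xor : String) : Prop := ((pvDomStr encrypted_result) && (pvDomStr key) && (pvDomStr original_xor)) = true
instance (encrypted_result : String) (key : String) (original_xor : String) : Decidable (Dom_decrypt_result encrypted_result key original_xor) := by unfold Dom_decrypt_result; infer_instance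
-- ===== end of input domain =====

-- B replaces A's build-one-big-bit-string-then-rechunk pipeline by a single per-key-character
-- pass with a shifting bit register (objective: alternative decomposition, same cost).

-- ===== PORT A =====
-- char_to_binary: bin(ord(c)-ord('A'))[2:].zfill(8); none = the ValueError branch.
def pvCharToBinary (c : Char) : Option (List Char) :=
  if PySem.Chars.isupper c then
    some (PySem.Chars.zfill (PySem.Int.toBinChars ((c.toNat : Int) - 65)) 8)
  else if PySem.Chars.islower c then
    some (PySem.Chars.zfill (PySem.Int.toBinChars ((c.toNat : Int) - 97)) 8)
  else none

-- binary_to_char: chr(int(binary,2) % 26 + ord('A')).  The '.getD 0' is unreachable: every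
-- chunk passed to it is a nonempty string of '0'/'1' digits, on which int(·,2) returns.
def pvBinaryToChar (binary : List Char) : Char :=
  Char.ofNat ((PySem.Int.mod ((PySem.Int.ofCharsBase? binary 2).getD 0) 26).toNat + 65)

def decrypt_result (encrypted_result : String) (key : String) (original_xor : String) : String :=
  let keyL := key.toList
  -- len(key) = 0 makes '7 // len(key)' raise ZeroDivisionError: excluded by Pre_
  if keyL.length = 0 then "" else
  -- key * (7 // len(key)) + key[:7 % len(key)]  (Nat / and % on lengths = Python // and % here)
  let repeated_key := (List.replicate (7 / keyL.length) keyL).flatten ++ keyL.take (7 % keyL.length)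
  -- ''.join(char_to_binary(c) for c in repeated_key); none = the ValueError: excluded by Pre_
  match repeated_key.mapM pvCharToBinary with
  | none => ""
  | some bks =>
    let binary_key := bks.flatten
    let oxL := original_xor.toList
    -- for bit_encrypted, bit_key, bit_original in zip(original_xor, binary_key, original_xor)
    let decrypted := (oxL.zip (binary_key.zip oxL)).foldl
      (fun acc p => acc ++ [if p.2.2 = '1' then (if p.1 ≠ p.2.1 then '1' else '0')
                            else (if p.1 ≠ p.2.1 then '1' else '0')]) []
    -- [decrypted[i:i+8] for i in range(0, len(decrypted), 8)]
    let chunks := (PySem.List.pyRange 0 (decrypted.length : Int) 8).map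
      (fun i => PySem.List.slice decrypted (some i) (some (i + 8)))
    String.ofList (chunks.map pvBinaryToChar)

-- ===== PORT B =====
-- Source B's c.isupper()/c.islower() tests and v = ord(c)-ord('A'/'a'); none = its ValueError branch.
def pvKeyVal (c : Char) : Option Nat :=
  if PySem.Chars.isupper c then some (c.toNat - 65)
  else if PySem.Chars.islower c then some (c.toNat - 97)
  else none

-- the loop 'for j in range(7)' of Source B, with r = number of iterations left (r = 7 - j).
-- keyL.getD (j % keyL.length) ' ' is key[j % len(key)]; for an empty key Python raises
-- (ZeroDivisionError) — excluded by Pre_ — and the default ' ' feeds the 'none' branch.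
def pvAltGo (keyL oxL : List Char) : Nat → Nat → List Char
  | _, 0 => []
  | j, r + 1 =>
    let block := (oxL.drop (8 * j)).take 8       -- original_xor[8*j : 8*j+8]
    if block = [] then []                         -- if not block: break
    else
      match pvKeyVal (keyL.getD (j % keyL.length) ' ') with
      | none => []                                -- ValueError: excluded by Pre_
      | some v =>
        -- inner loop: n, w accumulator pair
        let s := block.foldl
          (fun (s : Nat × Nat) ch =>
            (2 * s.1 + (if ch ≠ (if s.2 &&& 128 ≠ 0 then '1' else '0') then 1 else 0),
             (s.2 <<< 1) &&& 255)) (0, v)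
        Char.ofNat (s.1 % 26 + 65) :: pvAltGo keyL oxL (j + 1) r

def decrypt_result_alt (encrypted_result : String) (key : String) (original_xor : String) : String :=
  String.ofList (pvAltGo key.toList original_xor.toList 0 7)

-- ===== PRECONDITION & SPEC =====
-- Pre_ excludes only inputs where A RAISES: an empty key ('7 // len(key)' is a
-- ZeroDivisionError) and keys whose first min(7, len(key)) characters — the only ones the
-- 7-character repeated key uses — are not all cased letters (char_to_binary raises
-- ValueError).  The letter tests are PySem.Chars.isupper/islower, which on the printable
-- ASCII domain Dom all claims assume coincide with Python's str.isupper/islower; within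
-- Dom, Pre_ admits exactly the inputs on which A returns.
def Pre_decrypt_result (encrypted_result : String) (key : String) (original_xor : String) : Prop :=
  key.toList ≠ [] ∧ ∀ j : Nat, j < min 7 key.toList.length →
    (PySem.Chars.isupper (key.toList.getD j ' ') = true ∨
     PySem.Chars.islower (key.toList.getD j ' ') = true)
instance (encrypted_result : String) (key : String) (original_xor : String) : Decidable (Pre_decrypt_result encrypted_result key original_xor) := by unfold Pre_decrypt_result; infer_instance

def pvWitness_decrypt_result : String × String × String := ("", "Key", "0110100")

def Spec_decrypt_result (encrypted_result : String) (key : String) (original_xor : String) (out : String) : Prop := out = decrypt_result_alt encrypted_result key original_xor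
instance (encrypted_result : String) (key : String) (original_xor : String) (out : String) : Decidable (Spec_decrypt_result encrypted_result key original_xor out) := by unfold Spec_decrypt_result; infer_instance

-- ===== CLAIM (what is proved, stated in full; the proofs are below) =====
def Claim_equal_decrypt_result : Prop := ∀ (encrypted_result : String) (key : String) (original_xor : String), Dom_decrypt_result encrypted_result key original_xor → Pre_decrypt_result encrypted_result key original_xor → Spec_decrypt_result encrypted_result key original_xor (decrypt_result encrypted_result key original_xor)

-- ===== LEMMAS AND PROOFS =====

-- the letter test, on the proof side
def pvAlpha (c : Char) : Prop := ('A' ≤ c ∧ c ≤ 'Z') ∨ ('a' ≤ c ∧ c ≤ 'z')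

-- B's 8-bit key register read top-down: k bits of w, shifting as Source B does
def pvBitsTop : Nat → Nat → List Char
  | _, 0 => []
  | w, k + 1 => (if w &&& 128 ≠ 0 then '1' else '0') :: pvBitsTop ((w <<< 1) &&& 255) k

-- the letter value of an alpha char
def pvVal (c : Char) : Nat := if 'A' ≤ c ∧ c ≤ 'Z' then c.toNat - 65 else c.toNat - 97

-- A's xor-bit
def pvD (x y : Char) : Char := if x ≠ y then '1' else '0'

-- value of a binary chunk
def pvParse (cs : List Char) : Nat := cs.foldl (fun a c => 2 * a + (if c = '1' then 1 else 0)) 0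

-- the k-bit zero-padded binary writing of m
def pvPad (k m : Nat) : List Char := (List.range k).map (fun i => if m.testBit (k - 1 - i) then '1' else '0')

-- recursive form of A's chunk comprehension
def pvChunks8 (l : List Char) : List (List Char) :=
  if h : l = [] then [] else l.take 8 :: pvChunks8 (l.drop 8)
  termination_by l.length
  decreasing_by simp [List.length_drop]; exact List.length_pos_of_ne_nil h

-- B's loop, rephrased over the list of key-letter values
def pvGoVals : List Nat → List Char → List Char
  | [], _ => []
  | v :: vs, xs =>
    if xs = [] then [] else
      (Char.ofNat (((xs.take 8).foldl
        (fun (s : Nat × Nat) ch =>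
          (2 * s.1 + (if ch ≠ (if s.2 &&& 128 ≠ 0 then '1' else '0') then 1 else 0),
           (s.2 <<< 1) &&& 255)) (0, v)).1 % 26 + 65)) :: pvGoVals vs (xs.drop 8)

lemma pv_char_le {c d : Char} : c ≤ d ↔ c.toNat ≤ d.toNat := by
  rw [Char.le_def, UInt32.le_iff_toNat_le]
  exact Iff.rfl

-- PySem's ASCII isupper/islower tests are exactly the range tests pvAlpha uses
lemma pv_alpha_of_tests {c : Char}
    (h : PySem.Chars.isupper c = true ∨ PySem.Chars.islower c = true) : pvAlpha c := by
  rcases h with h | h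
  · exact Or.inl (by simpa [PySem.Chars.isupper] using h)
  · exact Or.inr (by simpa [PySem.Chars.islower] using h)

-- A's 8-bit letter encoding equals B's shifting register read for letter values
lemma pv_bits (v : Nat) (hv : v < 26) :
    PySem.Chars.zfill (PySem.Int.toBinChars (v : Int)) 8 = pvBitsTop v 8 := by
  revert v; decide

lemma pv_char_to_binary {c : Char} (h : pvAlpha c) :
    pvCharToBinary c = some (pvBitsTop (pvVal c) 8) := by
  rcases h with ⟨h1, h2⟩ | ⟨h1, h2⟩
  · have e1 : 65 ≤ c.toNat := pv_char_le.mp h1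
    have e2 : c.toNat ≤ 90 := pv_char_le.mp h2
    have hcast : (c.toNat : Int) - 65 = ((c.toNat - 65 : Nat) : Int) := by omega
    have hup : PySem.Chars.isupper c = true := by
      simp [PySem.Chars.isupper, h1, h2]
    rw [pvCharToBinary, if_pos hup, hcast, pv_bits _ (by omega), pvVal, if_pos ⟨h1, h2⟩]
  · have e1 : 97 ≤ c.toNat := pv_char_le.mp h1
    have e2 : c.toNat ≤ 122 := pv_char_le.mp h2
    have hnup : ¬ PySem.Chars.isupper c = true := by
      simp only [PySem.Chars.isupper, Bool.and_eq_true, decide_eq_true_eq, not_and]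
      intro _ h
      have h3 := pv_char_le.mp h
      have hz : 'Z'.toNat = 90 := rfl
      omega
    have hlo : PySem.Chars.islower c = true := by
      simp [PySem.Chars.islower, h1, h2]
    have hcast : (c.toNat : Int) - 97 = ((c.toNat - 97 : Nat) : Int) := by omega
    have hnup' : ¬ ('A' ≤ c ∧ c ≤ 'Z') := by
      intro h
      have h3 := pv_char_le.mp h.2
      have hz : 'Z'.toNat = 90 := rfl
      omega
    rw [pvCharToBinary, if_neg hnup, if_pos hlo, hcast, pv_bits _ (by omega), pvVal,
      if_neg hnup']

lemma pv_mapM : ∀ (cs : List Char), (∀ c ∈ cs, pvAlpha c) →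
    cs.mapM pvCharToBinary = some (cs.map (fun c => pvBitsTop (pvVal c) 8))
  | [], _ => rfl
  | c :: t, h => by
    rw [List.mapM_cons, pv_char_to_binary (h c (by simp)),
      pv_mapM t (fun x hx => h x (by simp [hx]))]
    rfl

lemma pv_take_eq (L : List Char) (r : Nat) (hr : r ≤ L.length) :
    (List.range r).map (fun j => L.getD j ' ') = L.take r := by
  apply List.ext_getElem
  · simpa using hr
  · intro i h1 h2
    have hi : i < L.length := by simp at h1; omega
    simp [List.getD_eq_getElem?_getD, List.getElem?_eq_getElem hi]

lemma pv_repkey_aux : ∀ (q : Nat) (L : List Char) (r : Nat), L ≠ [] → r ≤ L.length →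
    (List.replicate q L).flatten ++ L.take r
      = (List.range (q * L.length + r)).map (fun j => L.getD (j % L.length) ' ')
  | 0, L, r, _, hr => by
    have h1 : (List.range r).map (fun j => L.getD (j % L.length) ' ')
        = (List.range r).map (fun j => L.getD j ' ') :=
      List.map_congr_left (fun j hj => by
        rw [Nat.mod_eq_of_lt (by simp only [List.mem_range] at hj; omega)])
    simp only [Nat.zero_mul, Nat.zero_add]
    rw [h1, pv_take_eq L r hr]
    simp
  | q + 1, L, r, hne, hr => by
    have hlen : 0 < L.length := List.length_pos_of_ne_nil hne
    have hsplit : (q + 1) * L.length + r = L.length + (q * L.length + r) := by ring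
    rw [hsplit, List.range_add, List.map_append]
    have h1 : (List.range L.length).map (fun j => L.getD (j % L.length) ' ') = L := by
      have he : (List.range L.length).map (fun j => L.getD (j % L.length) ' ')
          = (List.range L.length).map (fun j => L.getD j ' ') :=
        List.map_congr_left (fun j hj => by rw [Nat.mod_eq_of_lt (by simpa using hj)])
      rw [he, pv_take_eq L L.length le_rfl, List.take_length]
    have h2 : ((List.range (q * L.length + r)).map (fun k => L.length + k)).map
        (fun j => L.getD (j % L.length) ' ')
        = (List.range (q * L.length + r)).map (fun j => L.getD (j % L.length) ' ') := by
      rw [List.map_map]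
      exact List.map_congr_left (fun j _ => by simp [Nat.add_mod_left])
    rw [h1, h2, ← pv_repkey_aux q L r hne hr]
    simp [List.replicate_succ, List.append_assoc]

lemma pv_repkey (L : List Char) (hne : L ≠ []) :
    (List.replicate (7 / L.length) L).flatten ++ L.take (7 % L.length)
      = (List.range 7).map (fun j => L.getD (j % L.length) ' ') := by
  have hlen : 0 < L.length := List.length_pos_of_ne_nil hne
  have := pv_repkey_aux (7 / L.length) L (7 % L.length) hne
    (Nat.le_of_lt (Nat.mod_lt _ hlen))
  rwa [Nat.div_add_mod'] at this

-- the char the j-th block uses is among the first min(7, len) characters of the key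
lemma pv_alpha_idx (L : List Char) (hne : L ≠ [])
    (h : ∀ j : Nat, j < min 7 L.length → pvAlpha (L.getD j ' ')) (j : Nat) (hj : j < 7) :
    pvAlpha (L.getD (j % L.length) ' ') := by
  have hlen : 0 < L.length := List.length_pos_of_ne_nil hne
  have hi : j % L.length < L.length := Nat.mod_lt _ hlen
  have hi7 : j % L.length < 7 := by
    rcases (show L.length ≤ 7 ∨ 7 < L.length by omega) with h1 | h1
    · omega
    · rw [Nat.mod_eq_of_lt (by omega)]
      exact hj
  exact h _ (by omega)

lemma pv_zip3 : ∀ (a b : List Char),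
    (a.zip (b.zip a)).map (fun p => if p.1 ≠ p.2.1 then '1' else '0') = List.zipWith pvD a b
  | [], _ => by simp
  | _ :: _, [] => by simp
  | x :: a, y :: b => by
    simp only [List.zip_cons_cons, List.map_cons, List.zipWith_cons_cons]
    exact congrArg₂ List.cons rfl (pv_zip3 a b)

lemma pv_zipWith_append_left {α : Type} (f : α → α → α) :
    ∀ (b xs rest : List α), List.zipWith f xs (b ++ rest)
      = List.zipWith f (xs.take b.length) b ++ List.zipWith f (xs.drop b.length) rest
  | [], xs, rest => by simp
  | _ :: _, [], rest => by simp
  | y :: b, x :: xs, rest => by simp [pv_zipWith_append_left f b xs rest]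

lemma pv_chunks_range : ∀ (N : Nat) (l : List Char), l.length ≤ N →
    (List.range ((l.length + 7) / 8)).map (fun k => (l.drop (8 * k)).take 8) = pvChunks8 l
  | 0, l, h => by
    have : l = [] := List.eq_nil_of_length_eq_zero (by omega)
    subst this; simp [pvChunks8]
  | N + 1, l, h => by
    by_cases hl : l = []
    · subst hl; simp [pvChunks8]
    · have hpos : 0 < l.length := List.length_pos_of_ne_nil hl
      have hK : (l.length + 7) / 8 = ((l.drop 8).length + 7) / 8 + 1 := by
        simp only [List.length_drop]; omega
      rw [pvChunks8, dif_neg hl, hK, List.range_succ_eq_map, List.map_cons, List.map_map]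
      refine congrArg₂ List.cons (by simp) ?_
      rw [← pv_chunks_range N (l.drop 8) (by simp; omega)]
      simp only [List.length_drop]
      refine List.map_congr_left (fun k _ => ?_)
      simp only [Function.comp_apply]
      rw [List.drop_drop]
      congr 2
      omega

lemma pv_chunks_pyRange (l : List Char) :
    (PySem.List.pyRange 0 (l.length : Int) 8).map
      (fun i => PySem.List.slice l (some i) (some (i + 8))) = pvChunks8 l := by
  rw [PySem.List.pyRange_of_pos _ _ (by norm_num : (0:Int) < 8), List.map_map]
  by_cases hl : l = []
  · subst hl; simp [pvChunks8]
  · have hpos : 0 < l.length := List.length_pos_of_ne_nil hl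
    have hif : (if (0:Int) < (l.length : Int) then ((( l.length : Int) - 0 + 8 - 1) / 8).toNat else 0)
        = (l.length + 7) / 8 := by
      rw [if_pos (by exact_mod_cast hpos)]
      have he : ((l.length : Int) - 0 + 8 - 1) = ((l.length + 7 : Nat) : Int) := by
        push_cast; ring
      rw [he]
      omega
    rw [hif, ← pv_chunks_range l.length l le_rfl]
    refine List.map_congr_left (fun k _ => ?_)
    have h1 : (0 : Int) + 8 * (k : Int) = ((8 * k : Nat) : Int) := by push_cast; ring
    have h2 : ((8 * k : Nat) : Int) + 8 = ((8 * k + 8 : Nat) : Int) := by push_cast; ring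
    simp only [Function.comp_apply]
    rw [h1, h2, PySem.List.slice_natCast]
    congr 1
    omega

lemma pv_parse_acc : ∀ (t : List Char) (a : Nat),
    t.foldl (fun a c => 2 * a + (if c = '1' then 1 else 0)) a = a * 2 ^ t.length + pvParse t
  | [], a => by simp [pvParse]
  | c :: t, a => by
    have h1 := pv_parse_acc t (2 * a + (if c = '1' then 1 else 0))
    have h2 := pv_parse_acc t (if c = '1' then 1 else 0)
    simp only [pvParse, List.foldl_cons, Nat.mul_zero, Nat.zero_add] at *
    rw [h1, h2, List.length_cons, Nat.pow_succ]
    ring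

lemma pv_parse_lt : ∀ (t : List Char), pvParse t < 2 ^ t.length
  | [] => by simp [pvParse]
  | c :: t => by
    have h2 := pv_parse_acc t (if c = '1' then 1 else 0)
    have h3 := pv_parse_lt t
    simp only [pvParse, List.foldl_cons, Nat.mul_zero, Nat.zero_add] at h2 h3 ⊢
    rw [h2, List.length_cons, Nat.pow_succ]
    by_cases hc : c = '1' <;> simp [hc] <;> omega

set_option maxRecDepth 4096 in
-- int(·, 2) on a nonempty ≤8-digit zero-padded binary string
lemma pv_ofChars_pad : ∀ k : Nat, k < 9 → 1 ≤ k → ∀ m < 2 ^ k,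
    PySem.Int.ofCharsBase? (pvPad k m) 2 = some (m : Int) := by decide

lemma pv_pad_parse : ∀ (cs : List Char), (∀ c ∈ cs, c = '0' ∨ c = '1') →
    pvPad cs.length (pvParse cs) = cs
  | [], _ => by simp [pvPad]
  | c :: t, h => by
    have ht : ∀ x ∈ t, x = '0' ∨ x = '1' := fun x hx => h x (by simp [hx])
    have hlt := pv_parse_lt t
    have hm : pvParse (c :: t) = (if c = '1' then 1 else 0) * 2 ^ t.length + pvParse t := by
      simp only [pvParse, List.foldl_cons, Nat.mul_zero, Nat.zero_add]
      exact pv_parse_acc t _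
    have hmod : pvParse (c :: t) % 2 ^ t.length = pvParse t := by
      rw [hm]
      rcases h c (by simp) with rfl | rfl
      · simp [Nat.mod_eq_of_lt hlt]
      · simp [Nat.add_mod_left, Nat.mod_eq_of_lt hlt]
    have hdiv : pvParse (c :: t) / 2 ^ t.length = (if c = '1' then 1 else 0) := by
      rw [hm]
      rcases h c (by simp) with rfl | rfl
      · simp [Nat.div_eq_of_lt hlt]
      · simp only [reduceIte, Nat.one_mul, Nat.add_comm]
        rw [Nat.add_div_right _ (Nat.pow_pos (by norm_num)), Nat.div_eq_of_lt hlt]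
    have hhead : (if (pvParse (c :: t)).testBit (t.length + 1 - 1 - 0) = true
        then '1' else '0') = c := by
      simp only [Nat.add_sub_cancel, Nat.sub_zero,
        Nat.testBit_eq_decide_div_mod_eq, hdiv]
      rcases h c (by simp) with rfl | rfl <;> simp
    have htail : (List.range t.length).map
        ((fun i => if (pvParse (c :: t)).testBit (t.length + 1 - 1 - i) = true
            then '1' else '0') ∘ Nat.succ) = t := by
      conv_rhs => rw [← pv_pad_parse t ht]
      simp only [pvPad]
      refine List.map_congr_left (fun i hi => ?_)
      simp only [List.mem_range] at hi
      have hj : t.length - 1 - i < t.length := by omega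
      have hbit2 : (pvParse (c :: t)).testBit (t.length - 1 - i)
          = (pvParse t).testBit (t.length - 1 - i) := by
        rw [← hmod, Nat.testBit_mod_two_pow]
        simp [hj]
      simp only [Function.comp_apply,
        show t.length + 1 - 1 - (i + 1) = t.length - 1 - i from by omega, hbit2]
    rw [pvPad, List.length_cons, List.range_succ_eq_map, List.map_cons, List.map_map]
    exact congrArg₂ List.cons hhead htail

lemma pv_ofChars (cs : List Char) (h0 : cs ≠ []) (h8 : cs.length ≤ 8)
    (hb : ∀ c ∈ cs, c = '0' ∨ c = '1') :
    PySem.Int.ofCharsBase? cs 2 = some ((pvParse cs : Nat) : Int) := by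
  have hlen : 1 ≤ cs.length := List.length_pos_of_ne_nil h0
  have := pv_ofChars_pad cs.length (by omega) hlen (pvParse cs) (pv_parse_lt cs)
  rwa [pv_pad_parse cs hb] at this

lemma pv_b2c (cs : List Char) (h0 : cs ≠ []) (h8 : cs.length ≤ 8)
    (hb : ∀ c ∈ cs, c = '0' ∨ c = '1') :
    pvBinaryToChar cs = Char.ofNat (pvParse cs % 26 + 65) := by
  rw [pvBinaryToChar, pv_ofChars cs h0 h8 hb]
  have h1 : ((pvParse cs : Int) % 26).toNat = pvParse cs % 26 := by omega
  simp only [Option.getD_some,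
    PySem.Int.mod_eq_emod_of_pos (show (0 : Int) < 26 by norm_num), h1]

lemma pv_zipWith_bin : ∀ (a b : List Char), ∀ x ∈ List.zipWith pvD a b, x = '0' ∨ x = '1'
  | [], _, x, hx => by simp at hx
  | _ :: _, [], x, hx => by simp at hx
  | c :: a, d :: b, x, hx => by
    simp only [List.zipWith_cons_cons, List.mem_cons] at hx
    rcases hx with rfl | hx
    · rw [pvD]; split <;> simp
    · exact pv_zipWith_bin a b x hx

lemma pv_fold2 : ∀ (block : List Char) (k w m : Nat), block.length ≤ k →
    (List.zipWith pvD block (pvBitsTop w k)).foldl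
        (fun a c => 2 * a + (if c = '1' then 1 else 0)) m
      = (block.foldl (fun (s : Nat × Nat) ch =>
          (2 * s.1 + (if ch ≠ (if s.2 &&& 128 ≠ 0 then '1' else '0') then 1 else 0),
           (s.2 <<< 1) &&& 255)) (m, w)).1
  | [], k, w, m, _ => by simp
  | ch :: block, k + 1, w, m, h => by
    rw [pvBitsTop, List.zipWith_cons_cons, List.foldl_cons, List.foldl_cons]
    rw [pv_fold2 block k ((w <<< 1) &&& 255) _ (by simpa using h)]
    congr 2
    by_cases hch : ch = (if w &&& 128 ≠ 0 then '1' else '0') <;> simp [pvD, hch]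

lemma pv_bits_len : ∀ (k w : Nat), (pvBitsTop w k).length = k
  | 0, _ => rfl
  | k + 1, w => by simp [pvBitsTop, pv_bits_len k]

lemma pv_main : ∀ (vs : List Nat) (xs : List Char),
    (pvChunks8 (List.zipWith pvD xs ((vs.map (fun v => pvBitsTop v 8)).flatten))).map
        pvBinaryToChar = pvGoVals vs xs
  | [], xs => by simp [pvGoVals, pvChunks8]
  | v :: vs, xs => by
    rw [List.map_cons, List.flatten_cons, pv_zipWith_append_left, pv_bits_len]
    by_cases hxs : xs = []
    · subst hxs; simp [pvGoVals, pvChunks8]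
    · have hxpos : 0 < xs.length := List.length_pos_of_ne_nil hxs
      set a := List.zipWith pvD (xs.take 8) (pvBitsTop v 8) with ha
      set b := List.zipWith pvD (xs.drop 8) ((vs.map (fun v => pvBitsTop v 8)).flatten) with hb
      have hla : a.length = min xs.length 8 := by
        rw [ha, List.length_zipWith, pv_bits_len, List.length_take]
        omega
      have hane : a ≠ [] := by
        intro h
        rw [h] at hla
        simp at hla
        omega
      have habin : ∀ x ∈ a, x = '0' ∨ x = '1' := pv_zipWith_bin _ _
      have hchunk : pvChunks8 (a ++ b) = a :: pvChunks8 b := by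
        rcases (show xs.length ≤ 8 ∨ 8 < xs.length by omega) with h8 | h8
        · have hbnil : b = [] := by
            rw [hb, List.drop_eq_nil_of_le h8]; simp
          rw [hbnil, List.append_nil, pvChunks8, dif_neg hane,
            List.take_of_length_le (by omega), List.drop_eq_nil_of_le (by omega)]
        · have hla8 : a.length = 8 := by omega
          rw [pvChunks8, dif_neg (by simp [hane]), ← hla8, List.take_left, List.drop_left]
      rw [hchunk, List.map_cons, pv_main vs (xs.drop 8)]
      rw [pvGoVals, if_neg hxs]
      congr 1
      rw [pv_b2c a hane (by omega) habin, pvParse, ha,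
        pv_fold2 (xs.take 8) 8 v 0 (by simp)]

lemma pv_keyval {c : Char} (h : pvAlpha c) : pvKeyVal c = some (pvVal c) := by
  rcases h with ⟨h1, h2⟩ | ⟨h1, h2⟩
  · have hup : PySem.Chars.isupper c = true := by
      simp [PySem.Chars.isupper, h1, h2]
    rw [pvKeyVal, if_pos hup, pvVal, if_pos ⟨h1, h2⟩]
  · have hnup : ¬ PySem.Chars.isupper c = true := by
      simp only [PySem.Chars.isupper, Bool.and_eq_true, decide_eq_true_eq, not_and]
      intro _ hh
      have h3 := pv_char_le.mp hh
      have h4 := pv_char_le.mp h1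
      have hz : 'Z'.toNat = 90 := rfl
      have ha : 'a'.toNat = 97 := rfl
      omega
    have hlo : PySem.Chars.islower c = true := by
      simp [PySem.Chars.islower, h1, h2]
    have hnup' : ¬ ('A' ≤ c ∧ c ≤ 'Z') := by
      intro hh
      have h3 := pv_char_le.mp hh.2
      have h4 := pv_char_le.mp h1
      have hz : 'Z'.toNat = 90 := rfl
      have ha : 'a'.toNat = 97 := rfl
      omega
    rw [pvKeyVal, if_neg hnup, if_pos hlo, pvVal, if_neg hnup']

lemma pv_alt_go : ∀ (r j : Nat) (L xs : List Char),
    (∀ i, i < r → pvAlpha (L.getD ((j + i) % L.length) ' ')) →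
    pvAltGo L xs j r
      = pvGoVals ((List.range r).map (fun i => pvVal (L.getD ((j + i) % L.length) ' ')))
          (xs.drop (8 * j))
  | 0, j, L, xs, _ => by simp [pvAltGo, pvGoVals]
  | r + 1, j, L, xs, h => by
    have h0' := h 0 (by omega)
    rw [Nat.add_zero] at h0'
    rw [pvAltGo, List.range_succ_eq_map, List.map_cons, List.map_map]
    simp only [Nat.add_zero]
    by_cases hblock : (xs.drop (8 * j)).take 8 = []
    · have hnil : xs.drop (8 * j) = [] := by
        rcases List.take_eq_nil_iff.mp hblock with h1 | h1 <;> first | exact h1 | omega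
      rw [if_pos hblock, pvGoVals, if_pos hnil]
    · have hnnil : xs.drop (8 * j) ≠ [] := fun hh => hblock (by rw [hh]; simp)
      rw [if_neg hblock]
      simp only [pv_keyval h0', pvGoVals, if_neg hnnil]
      refine congrArg₂ List.cons rfl ?_
      have hrec := pv_alt_go r (j + 1) L xs (fun i hi => by
        have hh := h (i + 1) (by omega)
        rwa [(show j + (i + 1) = j + 1 + i by omega)] at hh)
      have e2 : xs.drop (8 * (j + 1)) = (xs.drop (8 * j)).drop 8 := by
        rw [List.drop_drop]
        try congr 1
        try omega
      have e3 : (List.range r).map (fun i => pvVal (L.getD ((j + 1 + i) % L.length) ' '))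
          = (List.range r).map ((fun i => pvVal (L.getD ((j + i) % L.length) ' ')) ∘ Nat.succ) :=
        List.map_congr_left (fun i _ => by
          simp only [Function.comp_apply, Nat.succ_eq_add_one]
          rw [(show j + 1 + i = j + (i + 1) by omega)])
      rw [hrec]
      rw [e2]
      rw [e3]

-- ===== VERDICT (by name: the statement is the Claim_ definition above) =====
theorem decrypt_result_spec : Claim_equal_decrypt_result := by
  intro er key ox _ hpre
  obtain ⟨hne, htake⟩ := hpre
  have htake' : ∀ j : Nat, j < min 7 key.toList.length → pvAlpha (key.toList.getD j ' ') :=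
    fun j hj => pv_alpha_of_tests (htake j hj)
  have halpha : ∀ j, j < 7 → pvAlpha (key.toList.getD (j % key.toList.length) ' ') :=
    fun j hj => pv_alpha_idx key.toList hne htake' j hj
  have hlen0 : ¬ (key.toList.length = 0) :=
    fun hh => hne (List.eq_nil_of_length_eq_zero hh)
  have hmapM := pv_mapM
    ((List.range 7).map (fun j => key.toList.getD (j % key.toList.length) ' '))
    (fun c hc => by
      obtain ⟨j, hj, rfl⟩ := List.mem_map.mp hc
      exact halpha j (by simpa using hj))
  have hmain := pv_main
    ((List.range 7).map (fun j => pvVal (key.toList.getD (j % key.toList.length) ' ')))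
    ox.toList
  simp only [List.map_map] at hmain
  have hgo := pv_alt_go 7 0 key.toList ox.toList (fun i hi => by simpa using halpha i hi)
  simp only [Nat.zero_add, Nat.mul_zero, List.drop_zero] at hgo
  have hcomp : ((fun c => pvBitsTop (pvVal c) 8) ∘
        fun j => key.toList.getD (j % key.toList.length) ' ')
      = ((fun v => pvBitsTop v 8) ∘
        fun j => pvVal (key.toList.getD (j % key.toList.length) ' ')) := rfl
  unfold Spec_decrypt_result decrypt_result decrypt_result_alt
  simp only [if_neg hlen0, pv_repkey key.toList hne, hmapM, List.map_map,
    PySem.List.foldl_append_singleton_eq_map, List.nil_append, ite_self,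
    pv_zip3, pv_chunks_pyRange, hcomp, hmain, hgo]
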